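-- pv_equiv track=rewrite | github.com/0xdomyz/math | quantitative_finance/algorithmic_trading/fundamentals/latency_and_speed/latency_and_speed.py | simulate_arbitrage_race
-- ===== SOURCE A (Python) =====
-- def simulate_arbitrage_race(traders, n_events, opportunity_duration_us, profit_per_trade):
--     """
--     Simulate arbitrage opportunities where fastest trader wins.
--     Each opportunity appears at random time, lasts for opportunity_duration_us.
--     """
--     results = {trader: {'wins': 0, 'profit': 0, 'attempts': 0}
--               for trader in traders.keys()}
--
--     for event in range(n_events):
--         # All traders detect opportunity simultaneously (t=0)
--         # But execute at different times based on latency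
--
--         trader_arrival_times = {trader: latency
--                                for trader, latency in traders.items()}
--
--         # Find fastest trader
--         fastest_trader = min(trader_arrival_times, key=trader_arrival_times.get)
--         fastest_time = trader_arrival_times[fastest_trader]
--
--         # Check if fastest trader arrives before opportunity expires
--         if fastest_time <= opportunity_duration_us:
--             results[fastest_trader]['wins'] += 1
--             results[fastest_trader]['profit'] += profit_per_trade
--
--         # Count attempts for all traders
--         for trader in traders.keys():
--             results[trader]['attempts'] += 1
--
--     return results
-- ===== SOURCE B (Python) =====
-- def simulate_arbitrage_race(traders, n_events, opportunity_duration_us, profit_per_trade):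
--     # Closed form: every event is identical, so compute the fastest trader once
--     # and scale wins/profit/attempts by the number of events.
--     ev = n_events if n_events > 0 else 0
--     results = {t: {'wins': 0, 'profit': 0, 'attempts': ev} for t in traders}
--     if ev > 0 and traders:
--         fastest = min(traders, key=traders.get)
--         if traders[fastest] <= opportunity_duration_us:
--             results[fastest]['wins'] = ev
--             results[fastest]['profit'] = ev * profit_per_trade
--     return results
-- ===== Notes on version B (the rewrite author's own statement) =====
-- stated objective: faster
-- what changed: Every simulated event is identical, so B computes the fastest trader once and fills in wins/profit/attempts by multiplying with the event count instead of looping over n_events events.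
-- outside the precondition, e.g. on simulate_arbitrage_race({}, 1, 10, 5): A raises ValueError, B returns {}
import Mathlib
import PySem

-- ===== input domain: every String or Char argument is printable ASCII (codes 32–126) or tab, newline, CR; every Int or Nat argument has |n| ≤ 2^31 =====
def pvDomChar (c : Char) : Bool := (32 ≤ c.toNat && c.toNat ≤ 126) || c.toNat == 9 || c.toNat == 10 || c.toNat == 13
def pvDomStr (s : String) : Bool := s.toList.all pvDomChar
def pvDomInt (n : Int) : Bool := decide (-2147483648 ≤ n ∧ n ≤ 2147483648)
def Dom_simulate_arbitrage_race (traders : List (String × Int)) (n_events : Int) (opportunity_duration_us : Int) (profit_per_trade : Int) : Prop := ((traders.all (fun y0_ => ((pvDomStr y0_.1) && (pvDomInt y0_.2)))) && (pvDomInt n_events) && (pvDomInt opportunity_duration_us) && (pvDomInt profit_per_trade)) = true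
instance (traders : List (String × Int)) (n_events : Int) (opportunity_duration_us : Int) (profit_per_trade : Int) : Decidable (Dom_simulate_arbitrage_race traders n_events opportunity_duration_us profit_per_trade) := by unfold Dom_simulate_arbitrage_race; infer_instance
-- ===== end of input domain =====

-- B computes the single (identical) race outcome once and scales it by the number of
-- events, instead of replaying the same race n_events times: asymptotically faster.


-- ===== PORT A =====
-- literal port: results dict of per-trader dicts, then one fold iteration per event;
-- the min(…, key=d.get) key function is ported as getD (every key of the dict has a value)
def simulate_arbitrage_race (traders : List (String × Int)) (n_events : Int) (opportunity_duration_us : Int) (profit_per_trade : Int) : List (String × List (String × Int)) :=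
  let d : PySem.Dict String Int := PySem.Dict.ofList traders
  let results0 : PySem.Dict String (PySem.Dict String Int) :=
    d.keys.foldl (fun r t => r.insert t (PySem.Dict.ofList [("wins", (0 : Int)), ("profit", 0), ("attempts", 0)])) PySem.Dict.empty
  let results :=
    (PySem.List.pyRange 0 n_events 1).foldl (fun r _event =>
      let arrival : PySem.Dict String Int :=
        d.items.foldl (fun a p => a.insert p.1 p.2) PySem.Dict.empty
      match PySem.List.min? arrival.keys (fun t => arrival.getD t 0) with
      | none => r  -- min() of an empty dict: Python raises ValueError here; excluded by Pre_
      | some fastest =>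
        let fastest_time := arrival.getD fastest 0
        let r :=
          if fastest_time ≤ opportunity_duration_us then
            (r.modify fastest PySem.Dict.empty (fun inner => inner.modify "wins" 0 (· + 1))).modify
              fastest PySem.Dict.empty (fun inner => inner.modify "profit" 0 (· + profit_per_trade))
          else r
        d.keys.foldl (fun r t => r.modify t PySem.Dict.empty (fun inner => inner.modify "attempts" 0 (· + 1))) r)
      results0
  results.items.map (fun p => (p.1, p.2.items))

-- ===== PORT B =====
def simulate_arbitrage_race_alt (traders : List (String × Int)) (n_events : Int) (opportunity_duration_us : Int) (profit_per_trade : Int) : List (String × List (String × Int)) :=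
  let d : PySem.Dict String Int := PySem.Dict.ofList traders
  let ev : Int := if 0 < n_events then n_events else 0
  let base : List (String × Int) := [("wins", 0), ("profit", 0), ("attempts", ev)]
  match (if 0 < ev then PySem.List.min? d.keys (fun t => d.getD t 0) else none) with
  | some fastest =>
      if d.getD fastest 0 ≤ opportunity_duration_us then
        d.keys.map (fun t => (t, if t = fastest then [("wins", ev), ("profit", ev * profit_per_trade), ("attempts", ev)] else base))
      else d.keys.map (fun t => (t, base))
  | none => d.keys.map (fun t => (t, base))

-- ===== PRECONDITION & SPEC =====
-- Pre_ excludes only the inputs where A raises: empty traders with n_events >= 1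
-- (min() of an empty sequence raises ValueError).
def Pre_simulate_arbitrage_race (traders : List (String × Int)) (n_events : Int) (opportunity_duration_us : Int) (profit_per_trade : Int) : Prop :=
  traders = [] → n_events ≤ 0
instance (traders : List (String × Int)) (n_events : Int) (opportunity_duration_us : Int) (profit_per_trade : Int) : Decidable (Pre_simulate_arbitrage_race traders n_events opportunity_duration_us profit_per_trade) := by unfold Pre_simulate_arbitrage_race; infer_instance

def pvWitness_simulate_arbitrage_race : (List (String × Int)) × Int × Int × Int := ([("a", 5), ("b", 3)], 2, 10, 7)

def Spec_simulate_arbitrage_race (traders : List (String × Int)) (n_events : Int) (opportunity_duration_us : Int) (profit_per_trade : Int) (out : List (String × List (String × Int))) : Prop := out = simulate_arbitrage_race_alt traders n_events opportunity_duration_us profit_per_trade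
instance (traders : List (String × Int)) (n_events : Int) (opportunity_duration_us : Int) (profit_per_trade : Int) (out : List (String × List (String × Int))) : Decidable (Spec_simulate_arbitrage_race traders n_events opportunity_duration_us profit_per_trade out) := by unfold Spec_simulate_arbitrage_race; infer_instance

-- ===== CLAIM (what is proved, stated in full; the proofs are below) =====
def Claim_equal_simulate_arbitrage_race : Prop := ∀ (traders : List (String × Int)) (n_events : Int) (opportunity_duration_us : Int) (profit_per_trade : Int), Dom_simulate_arbitrage_race traders n_events opportunity_duration_us profit_per_trade → Pre_simulate_arbitrage_race traders n_events opportunity_duration_us profit_per_trade → Spec_simulate_arbitrage_race traders n_events opportunity_duration_us profit_per_trade (simulate_arbitrage_race traders n_events opportunity_duration_us profit_per_trade)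

-- ===== LEMMAS AND PROOFS =====

-- the per-trader tally after m events: the fastest trader (if it beats the window) has m
-- wins and m*profit, everyone has m attempts
def pvInner (fastest : String) (win : Bool) (ppt : Int) (m : Nat) (t : String) : PySem.Dict String Int :=
  PySem.Dict.mk [("wins", if t = fastest ∧ win = true then (m : Int) else 0),
                 ("profit", if t = fastest ∧ win = true then (m : Int) * ppt else 0),
                 ("attempts", (m : Int))]

-- the body of A's per-event loop, as a function of the accumulator only
def pvStep (d : PySem.Dict String Int) (odu ppt : Int) (r : PySem.Dict String (PySem.Dict String Int)) : PySem.Dict String (PySem.Dict String Int) :=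
  let arrival : PySem.Dict String Int :=
    d.items.foldl (fun a p => a.insert p.1 p.2) PySem.Dict.empty
  match PySem.List.min? arrival.keys (fun t => arrival.getD t 0) with
  | none => r
  | some fastest =>
    let fastest_time := arrival.getD fastest 0
    let r :=
      if fastest_time ≤ odu then
        (r.modify fastest PySem.Dict.empty (fun inner => inner.modify "wins" 0 (· + 1))).modify
          fastest PySem.Dict.empty (fun inner => inner.modify "profit" 0 (· + ppt))
      else r
    d.keys.foldl (fun r t => r.modify t PySem.Dict.empty (fun inner => inner.modify "attempts" 0 (· + 1))) r

lemma pv_foldl_const {α β : Type} (g : β → β) (l : List α) (r : β) :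
    l.foldl (fun r _ => g r) r = g^[l.length] r := by
  induction l generalizing r with
  | nil => rfl
  | cons a t ih => simp [List.foldl_cons, ih, Function.iterate_succ_apply]

lemma pv_ofList_items (d : PySem.Dict String Int) (h : d.keys.Nodup) :
    d.items.foldl (fun a p => a.insert p.1 p.2) PySem.Dict.empty = d := by
  apply PySem.Dict.ext
  have := PySem.Dict.items_foldl_insert_fresh (ν := Int) d.items Prod.fst Prod.snd PySem.Dict.empty
    (by intro a _; exact PySem.Dict.contains_empty a.1) (by simpa [PySem.Dict.keys] using h)
  simpa using this

lemma pv_getD_mk_map {ν : Type} (K : List String) (f : String → ν) (hnd : K.Nodup) (t : String)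
    (ht : t ∈ K) (dflt : ν) :
    (PySem.Dict.mk (K.map (fun t => (t, f t)))).getD t dflt = f t := by
  apply PySem.Dict.getD_of_mem_items
  · exact List.mem_map.2 ⟨t, ht, rfl⟩
  · simpa [PySem.Dict.keys, List.map_map, Function.comp_def] using hnd

lemma pv_keys_foldl_modify {ν : Type} (l : List String) (d0 : ν) (f : ν → ν) :
    ∀ (d : PySem.Dict String ν), (∀ x ∈ l, x ∈ d.keys) →
      (l.foldl (fun r t => r.modify t d0 f) d).keys = d.keys := by
  induction l with
  | nil => intro d _; rfl
  | cons a t ih =>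
    intro d h
    have hk : (d.modify a d0 f).keys = d.keys := by
      rw [PySem.Dict.keys_modify]
      exact PySem.Dict.keys_insert_of_contains d _ ((PySem.Dict.contains_iff_mem_keys d a).2 (h a (by simp)))
    rw [List.foldl_cons, ih (d.modify a d0 f) (by intro x hx; rw [hk]; exact h x (by simp [hx]))]
    exact hk

lemma pv_getD_foldl_modify {ν : Type} (l : List String) (hl : l.Nodup) (d0 : ν) (f : ν → ν) :
    ∀ (d : PySem.Dict String ν) (x : String),
      (l.foldl (fun r t => r.modify t d0 f) d).getD x d0 =
        if x ∈ l then f (d.getD x d0) else d.getD x d0 := by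
  induction l with
  | nil => intro d x; simp
  | cons a t ih =>
    intro d x
    rw [List.foldl_cons, ih (List.Nodup.of_cons hl) (d.modify a d0 f) x]
    by_cases hxt : x ∈ t
    · have hxa : x ≠ a := by rintro rfl; exact (List.nodup_cons.1 hl).1 hxt
      simp [hxt, hxa, PySem.Dict.getD_modify]
    · by_cases hxa : x = a
      · subst hxa; simp [hxt, PySem.Dict.getD_modify]
      · simp [hxt, hxa, PySem.Dict.getD_modify]

lemma pv_inner_att (W P A : Int) :
    (PySem.Dict.mk [("wins", W), ("profit", P), ("attempts", A)]).modify "attempts" 0 (· + 1) =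
      PySem.Dict.mk [("wins", W), ("profit", P), ("attempts", A + 1)] := rfl

lemma pv_inner_w1 (W P A : Int) :
    (PySem.Dict.mk [("wins", W), ("profit", P), ("attempts", A)]).modify "wins" 0 (· + 1) =
      PySem.Dict.mk [("wins", W + 1), ("profit", P), ("attempts", A)] := rfl

lemma pv_inner_w2 (ppt W P A : Int) :
    (PySem.Dict.mk [("wins", W), ("profit", P), ("attempts", A)]).modify "profit" 0 (· + ppt) =
      PySem.Dict.mk [("wins", W), ("profit", P + ppt), ("attempts", A)] := rfl

lemma pv_keys_mk_map {ν : Type} (K : List String) (f : String → ν) :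
    (PySem.Dict.mk (K.map (fun t => (t, f t)))).keys = K := by
  simp [PySem.Dict.keys, List.map_map, Function.comp_def]

lemma pvStep_state (d : PySem.Dict String Int) (odu ppt : Int) (fastest : String)
    (hnd : d.keys.Nodup)
    (hmin : PySem.List.min? d.keys (fun t => d.getD t 0) = some fastest) (m : Nat) :
    pvStep d odu ppt (PySem.Dict.mk (d.keys.map (fun t => (t, pvInner fastest (decide (d.getD fastest 0 ≤ odu)) ppt m t)))) =
      PySem.Dict.mk (d.keys.map (fun t => (t, pvInner fastest (decide (d.getD fastest 0 ≤ odu)) ppt (m + 1) t))) := by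
  have hfm : fastest ∈ d.keys := PySem.List.min?_mem hmin
  set win : Bool := decide (d.getD fastest 0 ≤ odu) with hwin
  set Rm : PySem.Dict String (PySem.Dict String Int) :=
    PySem.Dict.mk (d.keys.map (fun t => (t, pvInner fastest win ppt m t))) with hRm
  have hkeysRm : Rm.keys = d.keys := pv_keys_mk_map _ _
  -- the optional win/profit update
  set r' : PySem.Dict String (PySem.Dict String Int) :=
    if d.getD fastest 0 ≤ odu then
      (Rm.modify fastest PySem.Dict.empty (fun inner => inner.modify "wins" 0 (· + 1))).modify
        fastest PySem.Dict.empty (fun inner => inner.modify "profit" 0 (· + ppt))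
    else Rm with hr'
  have hkeysr' : r'.keys = d.keys := by
    rw [hr']
    split
    · rw [PySem.Dict.keys_modify]
      rw [PySem.Dict.keys_insert_of_contains]
      · rw [PySem.Dict.keys_modify]
        rw [PySem.Dict.keys_insert_of_contains]
        · exact hkeysRm
        · exact (PySem.Dict.contains_iff_mem_keys _ _).2 (hkeysRm ▸ hfm)
      · apply (PySem.Dict.contains_iff_mem_keys _ _).2
        rw [PySem.Dict.keys_modify, PySem.Dict.keys_insert_of_contains]
        · exact hkeysRm ▸ hfm
        · exact (PySem.Dict.contains_iff_mem_keys _ _).2 (hkeysRm ▸ hfm)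
    · exact hkeysRm
  have hgetr' : ∀ t ∈ d.keys, r'.getD t PySem.Dict.empty =
      (if t = fastest ∧ win = true then
        PySem.Dict.mk [("wins", (m : Int) + 1), ("profit", (m : Int) * ppt + ppt), ("attempts", (m : Int))]
       else pvInner fastest win ppt m t) := by
    intro t ht
    have hRget : ∀ x ∈ d.keys, Rm.getD x PySem.Dict.empty = pvInner fastest win ppt m x := by
      intro x hx; exact pv_getD_mk_map d.keys _ hnd x hx _
    rw [hr']
    by_cases hw : d.getD fastest 0 ≤ odu
    · rw [if_pos hw]
      have hwt : win = true := by simp [hwin, hw]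
      by_cases ht' : t = fastest
      · subst ht'
        rw [PySem.Dict.getD_modify, if_pos rfl, PySem.Dict.getD_modify, if_pos rfl,
          hRget t ht]
        simp [pvInner, hwt, pv_inner_w1, pv_inner_w2]
      · rw [PySem.Dict.getD_modify, if_neg ht', PySem.Dict.getD_modify, if_neg ht', hRget t ht]
        simp [ht']
    · rw [if_neg hw]
      have hwt : win = false := by simp [hwin, hw]
      rw [hRget t ht]
      simp [hwt]
  -- now the attempts loop
  have hstep : pvStep d odu ppt Rm = d.keys.foldl (fun r t => r.modify t PySem.Dict.empty (fun inner => inner.modify "attempts" 0 (· + 1))) r' := by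
    rw [hr']
    simp only [pvStep, pv_ofList_items d hnd, hmin]
  rw [hstep]
  apply PySem.Dict.ext
  have hkeys : (d.keys.foldl (fun r t => r.modify t PySem.Dict.empty (fun inner => inner.modify "attempts" 0 (· + 1))) r').keys = d.keys := by
    rw [pv_keys_foldl_modify _ _ _ r' (by intro x hx; rw [hkeysr']; exact hx)]; exact hkeysr'
  rw [PySem.Dict.items_eq_map_keys _ (by rw [hkeys]; exact hnd) PySem.Dict.empty, hkeys]
  show d.keys.map _ = (d.keys.map fun t => (t, pvInner fastest win ppt (m + 1) t))
  apply List.map_congr_left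
  intro t ht
  rw [pv_getD_foldl_modify d.keys hnd _ _ r' t, if_pos ht, hgetr' t ht]
  by_cases htf : t = fastest ∧ win = true
  · rw [if_pos htf]
    simp only [pvInner, htf, pv_inner_att]
    push_cast
    ring_nf
    simp
  · rw [if_neg htf]
    simp only [pvInner, if_neg htf, pv_inner_att]
    push_cast
    simp

lemma pvStep_iterate (d : PySem.Dict String Int) (odu ppt : Int) (fastest : String)
    (hnd : d.keys.Nodup)
    (hmin : PySem.List.min? d.keys (fun t => d.getD t 0) = some fastest) (m : Nat) :
    (pvStep d odu ppt)^[m] (PySem.Dict.mk (d.keys.map (fun t => (t, pvInner fastest (decide (d.getD fastest 0 ≤ odu)) ppt 0 t)))) =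
      PySem.Dict.mk (d.keys.map (fun t => (t, pvInner fastest (decide (d.getD fastest 0 ≤ odu)) ppt m t))) := by
  induction m with
  | zero => rfl
  | succ k ih => rw [Function.iterate_succ_apply', ih, pvStep_state d odu ppt fastest hnd hmin k]

lemma pv_results0 (d : PySem.Dict String Int) (hnd : d.keys.Nodup) (fastest : String) (win : Bool) (ppt : Int) :
    d.keys.foldl (fun r t => r.insert t (PySem.Dict.ofList [("wins", (0 : Int)), ("profit", 0), ("attempts", 0)])) PySem.Dict.empty =
      PySem.Dict.mk (d.keys.map (fun t => (t, pvInner fastest win ppt 0 t))) := by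
  apply PySem.Dict.ext
  have := PySem.Dict.items_foldl_insert_fresh (ν := PySem.Dict String Int) d.keys id
    (fun _ => PySem.Dict.ofList [("wins", (0 : Int)), ("profit", 0), ("attempts", 0)]) PySem.Dict.empty
    (by intro a _; exact PySem.Dict.contains_empty a) (by simpa using hnd)
  simp only [id_eq] at this
  rw [this]
  apply List.map_congr_left
  intro t _
  have : pvInner fastest win ppt 0 t = PySem.Dict.ofList [("wins", (0 : Int)), ("profit", 0), ("attempts", 0)] := by
    simp [pvInner]
    rfl
  rw [this]

-- ===== VERDICT (by name: the statement is the Claim_ definition above) =====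
theorem simulate_arbitrage_race_spec : Claim_equal_simulate_arbitrage_race := by
  intro traders n_events odu ppt _dom hpre
  unfold Spec_simulate_arbitrage_race Pre_simulate_arbitrage_race at *
  by_cases htr : traders = []
  · -- empty traders: Pre_ forces n_events ≤ 0, both sides are the empty dict
    subst htr
    have hn : n_events ≤ 0 := hpre rfl
    have hrange : PySem.List.pyRange 0 n_events 1 = [] := by
      apply List.eq_nil_of_length_eq_zero
      have : (PySem.List.pyRange 0 n_events 1).length = n_events.toNat := by simp [pysem]
      omega
    have hk0 : (PySem.Dict.ofList ([] : List (String × Int))).keys = [] := rfl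
    have h1 : ¬ (0 : Int) < n_events := by omega
    simp [simulate_arbitrage_race, simulate_arbitrage_race_alt, hrange, hk0, h1]
    rfl
  · set d : PySem.Dict String Int := PySem.Dict.ofList traders with hd
    have hnd : d.keys.Nodup := PySem.Dict.nodup_keys_ofList traders
    have hkne : d.keys ≠ [] := by
      obtain ⟨p, tl, rfl⟩ := List.exists_cons_of_ne_nil htr
      intro hk
      have hm : p.1 ∈ d.keys := by
        rw [hd]
        show p.1 ∈ (List.foldl (fun acc q => acc.insert q.1 q.2) PySem.Dict.empty (p :: tl)).keys
        rw [PySem.Dict.keys_foldl_insert_key (p :: tl) Prod.fst (fun _ q => q.2) PySem.Dict.empty]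
        simp [pysem]
      rw [hk] at hm
      exact absurd hm (List.not_mem_nil)
    obtain ⟨fastest, hmin⟩ : ∃ f, PySem.List.min? d.keys (fun t => d.getD t 0) = some f := by
      cases h : PySem.List.min? d.keys (fun t => d.getD t 0) with
      | none => exact absurd ((PySem.List.min?_eq_none_iff _ _).1 h) hkne
      | some f => exact ⟨f, rfl⟩
    set win : Bool := decide (d.getD fastest 0 ≤ odu) with hwin
    have hA : simulate_arbitrage_race traders n_events odu ppt
        = ((PySem.List.pyRange 0 n_events 1).foldl (fun r _ => pvStep d odu ppt r)
            (d.keys.foldl (fun r t => r.insert t (PySem.Dict.ofList [("wins", (0 : Int)), ("profit", 0), ("attempts", 0)])) PySem.Dict.empty)).items.map (fun p => (p.1, p.2.items)) := rfl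
    rw [hA, pv_foldl_const, pv_results0 d hnd fastest win ppt]
    have hlen : (PySem.List.pyRange 0 n_events 1).length = n_events.toNat := by simp [pysem]
    rw [hlen, pvStep_iterate d odu ppt fastest hnd hmin n_events.toNat]
    by_cases hn : 0 < n_events
    · have hcast : ((n_events.toNat : Int)) = n_events := Int.toNat_of_nonneg (le_of_lt hn)
      show (d.keys.map fun t => (t, pvInner fastest win ppt n_events.toNat t)).map (fun p => (p.1, p.2.items))
          = simulate_arbitrage_race_alt traders n_events odu ppt
      unfold simulate_arbitrage_race_alt
      rw [← hd]
      simp only [if_pos hn, hmin]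
      rw [List.map_map]
      by_cases hw : d.getD fastest 0 ≤ odu
      · rw [if_pos hw]
        apply List.map_congr_left
        intro t _
        have hwt : win = true := by simp [hwin, hw]
        by_cases htf : t = fastest
        · simp [pvInner, Function.comp, htf, hwt, hcast]
        · simp [pvInner, Function.comp, htf, hwt, hcast]
      · rw [if_neg hw]
        apply List.map_congr_left
        intro t _
        have hwt : win = false := by simp [hwin, hw]
        simp [pvInner, Function.comp, hwt, hcast]
    · -- no events: every tally is zero on both sides
      have hz : n_events.toNat = 0 := by omega
      show (d.keys.map fun t => (t, pvInner fastest win ppt n_events.toNat t)).map (fun p => (p.1, p.2.items))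
          = simulate_arbitrage_race_alt traders n_events odu ppt
      unfold simulate_arbitrage_race_alt
      rw [← hd]
      simp only [if_neg hn]
      rw [List.map_map]
      have h00 : ¬ ((0:Int) < 0) := by omega
      simp only [if_neg h00]
      apply List.map_congr_left
      intro t _
      simp [pvInner, Function.comp, hz]
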